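-- pv_equiv track=rewrite | github.com/NurdauletovE/backend_only_postgre_docker | src/security/hardening.py | sanitize_log_data
-- ===== SOURCE A (Python) =====
-- from typing import Dict, List, Optional, Any
--
-- def sanitize_log_data(data: Any) -> str:
--     """
--     Sanitize data for logging to prevent log injection
--
--     Args:
--         data: Data to sanitize
--
--     Returns:
--         Sanitized string safe for logging
--     """
--     if data is None:
--         return "None"
--
--     # Convert to string
--     data_str = str(data)
--
--     # Remove/replace dangerous characters
--     dangerous_chars = ['\n', '\r', '\t', '\x00']
--     for char in dangerous_chars:
--         data_str = data_str.replace(char, '_')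
--
--     # Truncate if too long
--     max_length = 1000
--     if len(data_str) > max_length:
--         data_str = data_str[:max_length] + "...[truncated]"
--
--     return data_str
-- ===== SOURCE B (Python) =====
-- def sanitize_log_data(data):
--     if data is None:
--         return "None"
--     s = str(data)
--     out = []
--     for i, ch in enumerate(s):
--         if i == 1000:
--             # more characters remain, so the sanitized string would exceed 1000
--             return ''.join(out) + "...[truncated]"
--         out.append('_' if ch in '\n\r\t\x00' else ch)
--     return ''.join(out)
-- ===== Notes on version B (the rewrite author's own statement) =====
-- stated objective: alternative
-- what changed: Instead of four full replace passes followed by a separate length test and slice, B makes one fused character-by-character pass with an accumulator that sanitizes and truncates simultaneously, exiting early at index 1000 so long inputs are never fully scanned or materialized.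
import Mathlib
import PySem

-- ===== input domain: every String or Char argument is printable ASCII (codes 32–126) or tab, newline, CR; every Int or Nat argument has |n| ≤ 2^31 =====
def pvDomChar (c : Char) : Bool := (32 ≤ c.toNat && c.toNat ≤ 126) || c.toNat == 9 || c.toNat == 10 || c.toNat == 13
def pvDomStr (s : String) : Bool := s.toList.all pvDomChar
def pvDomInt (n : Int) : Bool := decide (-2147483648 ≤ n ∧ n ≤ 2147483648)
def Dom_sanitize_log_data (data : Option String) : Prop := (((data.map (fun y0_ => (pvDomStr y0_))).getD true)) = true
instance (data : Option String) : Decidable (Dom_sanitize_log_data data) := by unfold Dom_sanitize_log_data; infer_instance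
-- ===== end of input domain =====

-- B fuses A's four replace passes and the separate truncation into one character-by-character
-- accumulator pass that exits early at index 1000 (alternative decomposition; return-value equivalence).

-- ===== PORT A =====
def sanitize_log_data (data : Option String) : String :=
  match data with
  | none => "None"
  | some s =>
    -- for char in dangerous_chars: data_str = data_str.replace(char, '_')
    let data_str := ["\n", "\r", "\t", "\x00"].foldl
      (fun acc ch => PySem.Str.replace acc ch "_") s
    if PySem.Str.len data_str > 1000 then
      PySem.Str.slice data_str none (some 1000) ++ "...[truncated]"
    else data_str

-- ===== PORT B =====
-- "'_' if ch in '\n\r\t\x00' else ch"  (membership in a 4-char string = this disjunction)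
def sanChar (c : Char) : Char :=
  if c = '\n' ∨ c = '\r' ∨ c = '\t' ∨ c = '\x00' then '_' else c

-- the "for i, ch in enumerate(s)" loop: i is the index, acc the out list (reversed)
def sanitizeGo : List Char → Nat → List Char → String
  | [], _, acc => String.ofList acc.reverse
  | c :: t, i, acc =>
    if i = 1000 then String.ofList acc.reverse ++ "...[truncated]"
    else sanitizeGo t (i + 1) (sanChar c :: acc)

def sanitize_log_data_alt (data : Option String) : String :=
  match data with
  | none => "None"
  | some s => sanitizeGo s.toList 0 []

-- ===== PRECONDITION & SPEC =====
def Spec_sanitize_log_data (data : Option String) (out : String) : Prop := out = sanitize_log_data_alt data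
instance (data : Option String) (out : String) : Decidable (Spec_sanitize_log_data data out) := by unfold Spec_sanitize_log_data; infer_instance

-- ===== CLAIM (what is proved, stated in full; the proofs are below) =====
def Claim_equal_sanitize_log_data : Prop := ∀ (data : Option String), Dom_sanitize_log_data data → Spec_sanitize_log_data data (sanitize_log_data data)

-- ===== LEMMAS AND PROOFS =====

-- replacing a single character by a single character is a map
theorem replace_go_single (c d : Char) :
    ∀ (l : List Char) (fuel : Nat) (acc : List Char), l.length ≤ fuel →
      PySem.Chars.replace.go [c] [d] fuel l acc
        = acc.reverse ++ l.map (fun x => if x = c then d else x) := by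
  intro l
  induction l with
  | nil =>
    intro fuel acc _
    cases fuel <;> simp [PySem.Chars.replace.go]
  | cons x t ih =>
    intro fuel acc h
    cases fuel with
    | zero => simp at h
    | succ n =>
      simp only [PySem.Chars.replace.go]
      by_cases hx : x = c
      · subst hx
        simp [List.isPrefixOf, ih n (d :: acc) (by simpa using h)]
      · simp [List.isPrefixOf, hx, Ne.symm hx, ih n (x :: acc) (by simpa using h)]

theorem replace_single (c d : Char) (l : List Char) :
    PySem.Chars.replace l [c] [d] = l.map (fun x => if x = c then d else x) := by
  simp [PySem.Chars.replace, replace_go_single c d l l.length [] le_rfl]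

-- A's four replace passes compute the single-character map by sanChar
theorem foldl_replace_toList (s : String) :
    (["\n", "\r", "\t", "\x00"].foldl
        (fun acc ch => PySem.Str.replace acc ch "_") s).toList
      = s.toList.map sanChar := by
  simp only [List.foldl, PySem.Str.toList_replace]
  rw [show ("\n" : String).toList = ['\n'] from rfl,
      show ("\r" : String).toList = ['\r'] from rfl,
      show ("\t" : String).toList = ['\t'] from rfl,
      show ("\x00" : String).toList = ['\x00'] from rfl,
      show ("_" : String).toList = ['_'] from rfl]
  simp only [replace_single, List.map_map]
  apply List.map_congr_left
  intro x _
  simp only [Function.comp, sanChar]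
  by_cases h1 : x = '\n' <;> by_cases h2 : x = '\r' <;> by_cases h3 : x = '\t' <;>
    by_cases h4 : x = '\x00' <;> simp_all

-- characterisation of B's fused loop
theorem sanitizeGo_eq :
    ∀ (l acc : List Char), acc.length ≤ 1000 →
      sanitizeGo l acc.length acc
        = if 1000 < acc.length + l.length then
            String.ofList ((acc.reverse ++ l.map sanChar).take 1000) ++ "...[truncated]"
          else String.ofList (acc.reverse ++ l.map sanChar) := by
  intro l
  induction l with
  | nil =>
    intro acc h
    simp [sanitizeGo, Nat.not_lt.mpr h]
  | cons c t ih =>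
    intro acc h
    simp only [sanitizeGo]
    by_cases hi : acc.length = 1000
    · have hc : 1000 < acc.length + (c :: t).length := by simp [hi]
      rw [if_pos hi, if_pos hc,
          show acc.reverse ++ (c :: t).map sanChar
              = acc.reverse ++ ((c :: t).map sanChar) from rfl,
          List.take_append_of_le_length (by simp [hi]),
          List.take_of_length_le (by simp [hi])]
    · have h' : (sanChar c :: acc).length ≤ 1000 := by
        simp only [List.length_cons]; omega
      have : acc.length + 1 = (sanChar c :: acc).length := by simp
      rw [if_neg hi, this, ih (sanChar c :: acc) h']
      have harr : (sanChar c :: acc).reverse ++ t.map sanChar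
          = acc.reverse ++ (c :: t).map sanChar := by
        simp
      rw [harr]
      have : (sanChar c :: acc).length + t.length = acc.length + (c :: t).length := by
        simp; omega
      rw [this]

-- ===== VERDICT (by name: the statement is the Claim_ definition above) =====
set_option maxHeartbeats 1000000 in
theorem sanitize_log_data_spec : Claim_equal_sanitize_log_data := by
  intro data _
  unfold Spec_sanitize_log_data sanitize_log_data sanitize_log_data_alt
  cases data with
  | none => rfl
  | some s =>
    simp only
    have hB := sanitizeGo_eq s.toList [] (by simp)
    simp only [List.length_nil, List.reverse_nil, List.nil_append, Nat.zero_add] at hB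
    rw [hB]
    have hA : (["\n", "\r", "\t", "\x00"].foldl
        (fun acc ch => PySem.Str.replace acc ch "_") s)
        = String.ofList (s.toList.map sanChar) := by
      exact String.toList_inj.mp
        ((foldl_replace_toList s).trans String.toList_ofList.symm)
    rw [hA]
    by_cases hlen : 1000 < s.toList.length
    · have hc : PySem.Str.len (String.ofList (s.toList.map sanChar)) > 1000 := by
        simp only [PySem.Str.len_eq, String.toList_ofList, List.length_map]
        exact_mod_cast hlen
      rw [if_pos hc, if_pos hlen]
      have hsl : PySem.Str.slice (String.ofList (s.toList.map sanChar)) none (some 1000)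
          = String.ofList ((s.toList.map sanChar).take 1000) := by
        apply String.toList_inj.mp
        rw [PySem.Str.toList_slice, String.toList_ofList]
        simp only [PySem.Chars.slice]
        rw [PySem.List.slice_to _ (by norm_num)]
        simp
      rw [hsl]
    · have hc : ¬ PySem.Str.len (String.ofList (s.toList.map sanChar)) > 1000 := by
        simp only [PySem.Str.len_eq, String.toList_ofList, List.length_map]
        exact_mod_cast hlen
      rw [if_neg hc, if_neg hlen]
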